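-- pv_equiv track=rewrite | github.com/dariy-vel/algorithms_labs | lab_5/main.py | angry_beaver
-- ===== SOURCE A (Python) =====
-- def angry_beaver(binary_in, x):
--     binary_x = []
--     power = 0
--     insert_string = ""
--     while len(insert_string) <= len(binary_in):
--         insert_string = "{0:b}".format(pow(x, power))
--         binary_x.insert(0, insert_string)
--         power += 1
--
--     def solution(input, counter=0):
--         for i in range(0, len(binary_in)):
--             if input[i:] in binary_x:
--                 counter += 1
--                 counter = solution(input[:i], counter)
--                 break
--         return counter
--
--     return solution(binary_in)
-- ===== SOURCE B (Python) =====
-- def angry_beaver(binary_in, x):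
--     n = len(binary_in)
--     # binary forms of powers of x that can fit in the input, built shortest-first
--     fits = []
--     p = 0
--     while True:
--         s = "{0:b}".format(x ** p)
--         if len(s) > n:
--             break
--         fits.append(s)
--         p += 1
--     fits.reverse()  # longest first
--     # iterative greedy peel: strip the longest table entry that is a suffix
--     count = 0
--     cur = binary_in
--     while True:
--         for t in fits:
--             if cur.endswith(t):
--                 count += 1
--                 cur = cur[: len(cur) - len(t)]
--                 break
--         else:
--             return count
-- ===== Notes on version B (the rewrite author's own statement) =====
-- stated objective: faster
-- what changed: A's recursive positional greedy (for each position i slice input[i:] and test membership in a table built front-inserting while the previous entry still fits) is replaced by: build only the fitting power strings by appending shortest-first with the break on the current entry, reverse once, then an iterative peel loop that strips the first (longest) table entry that is a suffix of the current string; no per-position slicing and no recursion.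
import Mathlib
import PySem

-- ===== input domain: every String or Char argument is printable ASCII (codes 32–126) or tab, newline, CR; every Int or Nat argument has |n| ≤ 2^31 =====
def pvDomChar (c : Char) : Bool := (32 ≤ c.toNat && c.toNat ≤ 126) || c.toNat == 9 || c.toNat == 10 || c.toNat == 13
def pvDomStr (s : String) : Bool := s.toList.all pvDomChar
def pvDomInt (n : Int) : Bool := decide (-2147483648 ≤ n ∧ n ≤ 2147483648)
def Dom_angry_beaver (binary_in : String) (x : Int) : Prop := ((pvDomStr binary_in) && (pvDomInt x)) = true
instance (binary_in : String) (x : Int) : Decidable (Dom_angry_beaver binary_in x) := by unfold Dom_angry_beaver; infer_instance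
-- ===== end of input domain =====

-- B replaces A's recursive positional greedy (slice input[i:] at every position, test list
-- membership, recurse, over a table built by front-insertion that keeps one oversized entry) by:
-- append only the fitting power strings shortest-first, reverse once, then an iterative peel loop
-- stripping the first (longest) entry that is a suffix of the current string.

-- ===== PORT A =====

-- hand port of "{0:b}".format(n): binary digits of a Nat, most significant first (exact for Nat)
def natBinAux : Nat → List Char → List Char
  | 0, acc => acc
  | n+1, acc => natBinAux ((n+1)/2) ((if (n+1) % 2 = 1 then '1' else '0') :: acc)

def binFmtNat (n : Nat) : List Char := if n = 0 then ['0'] else natBinAux n []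

-- hand port of "{0:b}".format for int: '-' prefix for negatives (exact; Python prints -|n| in binary)
def binFmt (z : Int) : List Char := if z < 0 then '-' :: binFmtNat z.natAbs else binFmtNat z.natAbs

-- A's while-loop building binary_x; fuel L+2 suffices on Pre_ (the loop body runs at most L+2
-- times there); insert(0, s) = cons
def tableLoop (L : Nat) (x : Int) : Nat → List (List Char) → Nat → List Char → List (List Char)
  | 0, tbl, _, _ => tbl
  | fuel+1, tbl, power, ins =>
    if ins.length ≤ L then
      tableLoop L x fuel (binFmt (x ^ power) :: tbl) (power+1) (binFmt (x ^ power))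
    else tbl

def buildTable (binary_in : String) (x : Int) : List (List Char) :=
  tableLoop binary_in.toList.length x (binary_in.toList.length + 2) [] 0 []

-- the for-loop of `solution`: first i in [i, i+rem) with input[i:] in binary_x
def scanA (T : List (List Char)) (cur : List Char) : Nat → Nat → Option Nat
  | _, 0 => none
  | i, rem+1 => if cur.drop i ∈ T then some i else scanA T cur (i+1) rem

-- `solution` itself; the dite guard only provides termination (i ≥ len is never hit: no table
-- entry is empty, so a match input[i:] ∈ T forces i < len)
def solA (T : List (List Char)) (L : Nat) (cur : List Char) (counter : Int) : Int :=
  match scanA T cur 0 L with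
  | none => counter
  | some i =>
    if _h : i < cur.length then solA T L (cur.take i) (counter + 1) else counter + 1
termination_by cur.length
decreasing_by simp [List.length_take]; omega

def angry_beaver (binary_in : String) (x : Int) : Int :=
  solA (buildTable binary_in x) binary_in.toList.length binary_in.toList 0

-- ===== PORT B =====

-- B's first while-loop: append each fitting power string, break when the current one is too long;
-- fuel L+2 suffices on Pre_
def fitsLoop (L : Nat) (x : Int) : Nat → Nat → List (List Char) → List (List Char)
  | 0, _, acc => acc
  | fuel+1, p, acc =>
    if L < (binFmt (x ^ p)).length then acc
    else fitsLoop L x fuel (p+1) (acc ++ [binFmt (x ^ p)])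

-- B's inner for-loop: first table entry that is a suffix of cur (str.endswith = isSuffixOf, exact)
def findSuffix (T : List (List Char)) (cur : List Char) : Option (List Char) :=
  match T with
  | [] => none
  | t :: ts => if t.isSuffixOf cur then some t else findSuffix ts cur

-- B's outer while-loop; the dite guard only provides termination (a matching entry is nonempty)
def loopB (T : List (List Char)) (cur : List Char) (count : Int) : Int :=
  match findSuffix T cur with
  | none => count
  | some t =>
    if _h : cur.length - t.length < cur.length then
      loopB T (cur.take (cur.length - t.length)) (count + 1)
    else count + 1
termination_by cur.length
decreasing_by simp [List.length_take]; omega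

def angry_beaver_alt (binary_in : String) (x : Int) : Int :=
  loopB ((fitsLoop binary_in.toList.length x (binary_in.toList.length + 2) 0 []).reverse)
    binary_in.toList 0

-- ===== PRECONDITION & SPEC =====

-- Pre_ excludes exactly the inputs on which A's table-building while-loop never terminates
-- (x ∈ {0, 1} with a nonempty input, and x = -1 with an input of length ≥ 2); A returns nowhere
-- outside Pre_.
def Pre_angry_beaver (binary_in : String) (x : Int) : Prop :=
  binary_in = "" ∨ 2 ≤ x ∨ x ≤ -2 ∨ (x = -1 ∧ binary_in.toList.length = 1)

instance (binary_in : String) (x : Int) : Decidable (Pre_angry_beaver binary_in x) := by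
  unfold Pre_angry_beaver; infer_instance

def pvWitness_angry_beaver : String × Int := ("10110", 2)

def Spec_angry_beaver (binary_in : String) (x : Int) (out : Int) : Prop := out = angry_beaver_alt binary_in x
instance (binary_in : String) (x : Int) (out : Int) : Decidable (Spec_angry_beaver binary_in x out) := by unfold Spec_angry_beaver; infer_instance

-- ===== CLAIM (what is proved, stated in full; the proofs are below) =====
def Claim_equal_angry_beaver : Prop := ∀ (binary_in : String) (x : Int), Dom_angry_beaver binary_in x → Pre_angry_beaver binary_in x → Spec_angry_beaver binary_in x (angry_beaver binary_in x)

-- ===== LEMMAS AND PROOFS =====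

theorem natBinAux_length_acc (n : Nat) : ∀ acc : List Char,
    (natBinAux n acc).length = (natBinAux n []).length + acc.length := by
  induction n using Nat.strong_induction_on with
  | _ n ih =>
    intro acc
    match n with
    | 0 => simp [natBinAux]
    | m+1 =>
      simp only [natBinAux]
      rw [ih ((m+1)/2) (by omega) ((if (m+1) % 2 = 1 then '1' else '0') :: acc),
          ih ((m+1)/2) (by omega) [(if (m+1) % 2 = 1 then '1' else '0')]]
      simp; omega

theorem natBinAux_pos {n : Nat} (h : 1 ≤ n) : 1 ≤ (natBinAux n []).length := by
  match n, h with
  | m+1, _ =>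
    simp only [natBinAux]
    rw [natBinAux_length_acc]
    simp

theorem natBinAux_step {n : Nat} (h : 1 ≤ n) :
    (natBinAux n []).length = (natBinAux (n/2) []).length + 1 := by
  match n, h with
  | m+1, _ =>
    conv_lhs => rw [show natBinAux (m+1) [] = natBinAux ((m+1)/2) [(if (m+1) % 2 = 1 then '1' else '0')] from by simp [natBinAux]]
    rw [natBinAux_length_acc]
    simp

theorem natBinAux_mono2 (n : Nat) : ∀ m : Nat, 1 ≤ n → 2*n ≤ m →
    (natBinAux n []).length + 1 ≤ (natBinAux m []).length := by
  induction n using Nat.strong_induction_on with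
  | _ n ih =>
    intro m hn hm
    rcases Nat.lt_or_ge n 2 with h2 | h2
    · have hn1 : n = 1 := by omega
      subst hn1
      have hm1 : 1 ≤ m/2 := by omega
      rw [natBinAux_step (by omega : 1 ≤ m)]
      have := natBinAux_pos hm1
      simp [natBinAux]; omega
    · have h1 : (natBinAux (n/2) []).length + 1 ≤ (natBinAux (m/2) []).length :=
        ih (n/2) (by omega) (m/2) (by omega) (by omega)
      rw [natBinAux_step hn, natBinAux_step (by omega : 1 ≤ m)]
      omega

theorem natBinAux_lb : ∀ (p n : Nat), 2^p ≤ n → p + 1 ≤ (natBinAux n []).length := by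
  intro p
  induction p with
  | zero => intro n hn; exact natBinAux_pos (by simpa using hn)
  | succ p ih =>
    intro n hn
    have h2 : 2^p ≤ n/2 := by
      rw [Nat.le_div_iff_mul_le (by norm_num)]
      calc 2^p * 2 = 2^(p+1) := by ring
      _ ≤ n := hn
    have hstep := natBinAux_step (show 1 ≤ n by have := Nat.one_le_two_pow (n := p+1); omega)
    have := ih (n/2) h2
    omega

theorem binFmt_ne_nil (z : Int) : binFmt z ≠ [] := by
  unfold binFmt binFmtNat
  split
  · simp
  · split
    · simp
    · have : 1 ≤ (natBinAux z.natAbs []).length := natBinAux_pos (by omega)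
      intro h
      rw [h] at this
      simp at this

theorem binFmt_len_mono {x : Int} (hx : 2 ≤ x ∨ x ≤ -2) (p : Nat) :
    (binFmt (x^p)).length ≤ (binFmt (x^(p+1))).length := by
  have ha : 2 ≤ x.natAbs := by omega
  have hpos : 1 ≤ x.natAbs ^ p := Nat.one_le_pow _ _ (by omega)
  have hkey : (natBinAux (x.natAbs ^ p) []).length + 1 ≤ (natBinAux (x.natAbs ^ (p+1)) []).length := by
    apply natBinAux_mono2 _ _ hpos
    calc 2 * x.natAbs ^ p ≤ x.natAbs * x.natAbs ^ p := Nat.mul_le_mul_right _ ha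
    _ = x.natAbs ^ (p+1) := by rw [pow_succ]; ring
  have e1 : (x ^ p).natAbs = x.natAbs ^ p := Int.natAbs_pow x p
  have e2 : (x ^ (p+1)).natAbs = x.natAbs ^ (p+1) := Int.natAbs_pow x (p+1)
  have hne1 : x.natAbs ^ p ≠ 0 := by omega
  have hne2 : x.natAbs ^ (p+1) ≠ 0 := by positivity
  unfold binFmt binFmtNat
  rw [e1, e2]
  split <;> split <;> simp <;> omega

theorem binFmt_len_lb {x : Int} (hx : 2 ≤ x ∨ x ≤ -2) (p : Nat) :
    p + 1 ≤ (binFmt (x^p)).length := by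
  have ha : 2 ≤ x.natAbs := by omega
  have e1 : (x ^ p).natAbs = x.natAbs ^ p := Int.natAbs_pow x p
  have h2 : 2^p ≤ x.natAbs ^ p := Nat.pow_le_pow_left ha p
  have hne : x.natAbs ^ p ≠ 0 := by positivity
  have := natBinAux_lb p (x.natAbs ^ p) h2
  unfold binFmt binFmtNat
  rw [e1, if_neg hne]
  split <;> simp <;> omega

-- closed form of A's table loop: the minimal too-long power m and everything below it, reversed
theorem tableLoop_closed {L : Nat} {x : Int} {m : Nat}
    (hgt : L < (binFmt (x^m)).length)
    (hmin : ∀ p < m, (binFmt (x^p)).length ≤ L) :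
    ∀ (fuel p : Nat) (tbl : List (List Char)) (ins : List Char),
      p ≤ m → m + 2 - p ≤ fuel → ins.length ≤ L →
      tableLoop L x fuel tbl p ins
        = ((List.range (m+1-p)).map (fun j => binFmt (x^(p+j)))).reverse ++ tbl := by
  intro fuel
  induction fuel with
  | zero => intro p tbl ins hp hf _; omega
  | succ fuel ih =>
    intro p tbl ins hp hf hins
    simp only [tableLoop, if_pos hins]
    rcases Nat.lt_or_ge p m with hlt | hge
    · rw [ih (p+1) (binFmt (x^p) :: tbl) (binFmt (x^p)) (by omega) (by omega) (hmin p hlt)]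
      have hr : m + 1 - p = (m - p) + 1 := by omega
      rw [hr, List.range_succ_eq_map]
      simp only [List.map_cons, List.map_map, List.reverse_cons]
      have : (fun j => binFmt (x ^ (p + 1 + j))) = (fun j => binFmt (x ^ (p + j))) ∘ Nat.succ := by
        funext j; simp [Function.comp]; ring_nf
      rw [this]
      simp [List.append_assoc]
    · have hpm : p = m := by omega
      subst hpm
      obtain ⟨fuel', rfl⟩ : ∃ f', fuel = f' + 1 := ⟨fuel - 1, by omega⟩
      simp only [tableLoop]
      rw [if_neg (by omega)]
      simp [List.range_succ_eq_map]

-- closed form of B's table loop: everything below m, in order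
theorem fitsLoop_closed {L : Nat} {x : Int} {m : Nat}
    (hgt : L < (binFmt (x^m)).length)
    (hmin : ∀ p < m, (binFmt (x^p)).length ≤ L) :
    ∀ (fuel p : Nat) (acc : List (List Char)),
      p ≤ m → m + 1 - p ≤ fuel →
      fitsLoop L x fuel p acc = acc ++ (List.range (m-p)).map (fun j => binFmt (x^(p+j))) := by
  intro fuel
  induction fuel with
  | zero => intro p acc hp hf; omega
  | succ fuel ih =>
    intro p acc hp hf
    simp only [fitsLoop]
    rcases Nat.lt_or_ge p m with hlt | hge
    · rw [if_neg (by have := hmin p hlt; omega)]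
      rw [ih (p+1) (acc ++ [binFmt (x^p)]) (by omega) (by omega)]
      have hr : m - p = (m - (p+1)) + 1 := by omega
      rw [hr, List.range_succ_eq_map]
      simp only [List.map_cons, List.map_map]
      have : (fun j => binFmt (x ^ (p + 1 + j))) = (fun j => binFmt (x ^ (p + j))) ∘ Nat.succ := by
        funext j; simp [Function.comp]; ring_nf
      rw [this]
      simp [List.append_assoc]
    · have hpm : p = m := by omega
      subst hpm
      rw [if_pos hgt]
      simp

theorem scanA_eq_none {T : List (List Char)} {cur : List Char} :
    ∀ (rem i : Nat), scanA T cur i rem = none ↔ ∀ j, i ≤ j → j < i + rem → cur.drop j ∉ T := by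
  intro rem
  induction rem with
  | zero => intro i; simp [scanA]; omega
  | succ rem ih =>
    intro i
    simp only [scanA]
    split
    · constructor
      · intro h; cases h
      · intro h
        exact absurd (by assumption) (h i le_rfl (by omega))
    · rw [ih (i+1)]
      constructor
      · intro h j hij hj
        rcases Nat.eq_or_lt_of_le hij with rfl | hlt
        · assumption
        · exact h j hlt (by omega)
      · intro h j hij hj
        exact h j (by omega) (by omega)

theorem scanA_eq_some {T : List (List Char)} {cur : List Char} :
    ∀ (rem i k : Nat), scanA T cur i rem = some k →
      cur.drop k ∈ T ∧ i ≤ k ∧ ∀ j, i ≤ j → j < k → cur.drop j ∉ T := by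
  intro rem
  induction rem with
  | zero => intro i k h; cases h
  | succ rem ih =>
    intro i k h
    simp only [scanA] at h
    split at h
    · cases h
      exact ⟨by assumption, le_rfl, fun j h1 h2 => absurd h1 (by omega)⟩
    · obtain ⟨hm, hik, hmin⟩ := ih (i+1) k h
      refine ⟨hm, by omega, fun j h1 h2 => ?_⟩
      rcases Nat.eq_or_lt_of_le h1 with rfl | hlt
      · assumption
      · exact hmin j (by omega) h2

-- a too-long head of the table is invisible to A's scan …
theorem scanA_cons_long {e : List Char} {T : List (List Char)} {cur : List Char}
    (he : cur.length < e.length) :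
    ∀ (rem i : Nat), scanA (e :: T) cur i rem = scanA T cur i rem := by
  intro rem
  induction rem with
  | zero => intro i; rfl
  | succ rem ih =>
    intro i
    simp only [scanA]
    have hne : cur.drop i ≠ e := by
      intro h
      have : (cur.drop i).length ≤ cur.length := by simp
      rw [h] at this
      omega
    by_cases hmem : cur.drop i ∈ T
    · simp [List.mem_cons, hne, hmem]
    · simp [List.mem_cons, hne, hmem, ih]

-- … and hence to `solution` as a whole
theorem solA_cons_long {e : List Char} {T : List (List Char)} {L : Nat}
    (heL : L < e.length) :
    ∀ (n : Nat) (cur : List Char), cur.length ≤ n → cur.length ≤ L → ∀ c : Int,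
      solA (e :: T) L cur c = solA T L cur c := by
  intro n
  induction n with
  | zero =>
    intro cur hn hL c
    rw [solA.eq_def, solA.eq_def, scanA_cons_long (by omega)]
    cases h : scanA T cur 0 L with
    | none => rfl
    | some i => simp only; rw [dif_neg (by omega), dif_neg (by omega)]
  | succ n ih =>
    intro cur hn hL c
    rw [solA.eq_def, solA.eq_def, scanA_cons_long (by omega)]
    cases h : scanA T cur 0 L with
    | none => rfl
    | some i =>
      simp only
      split
      · apply ih
        · simp; omega
        · simp; omega
      · rfl

theorem findSuffix_eq_none {T : List (List Char)} {cur : List Char} :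
    findSuffix T cur = none ↔ ∀ t ∈ T, ¬ t <:+ cur := by
  induction T with
  | nil => simp [findSuffix]
  | cons t ts ih =>
    simp only [findSuffix]
    split
    · simp only [List.isSuffixOf_iff_suffix] at *
      constructor
      · intro h; cases h
      · intro h; exact absurd (by assumption) (h t (by simp))
    · rw [ih]
      simp only [List.isSuffixOf_iff_suffix] at *
      constructor
      · intro h u hu
        rcases List.mem_cons.mp hu with rfl | hu
        · assumption
        · exact h u hu
      · intro h u hu; exact h u (List.mem_cons_of_mem _ hu)

theorem findSuffix_eq_some {T : List (List Char)} {cur : List Char} {t : List Char}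
    (hP2 : List.Pairwise (fun a b => b.length ≤ a.length) T)
    (h : findSuffix T cur = some t) :
    t ∈ T ∧ t <:+ cur ∧ ∀ u ∈ T, u <:+ cur → u.length ≤ t.length := by
  induction T with
  | nil => cases h
  | cons a ts ih =>
    simp only [findSuffix] at h
    rcases List.pairwise_cons.mp hP2 with ⟨ha, hts⟩
    split at h
    · cases h
      refine ⟨by simp, by rwa [List.isSuffixOf_iff_suffix] at *, ?_⟩
      intro u hu _
      rcases List.mem_cons.mp hu with rfl | hu
      · exact le_rfl
      · exact ha u hu
    · obtain ⟨hmem, hsuf, hmax⟩ := ih hts h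
      refine ⟨List.mem_cons_of_mem _ hmem, hsuf, ?_⟩
      intro u hu husuf
      rcases List.mem_cons.mp hu with rfl | hu
      · exact absurd (List.isSuffixOf_iff_suffix.mpr husuf) (by assumption)
      · exact hmax u hu husuf

theorem suffix_drop {t cur : List Char} (h : t <:+ cur) :
    cur.drop (cur.length - t.length) = t := by
  obtain ⟨s, rfl⟩ := h
  simp

theorem scan_none_iff {T : List (List Char)} {cur : List Char} {L : Nat}
    (hP1 : ∀ t ∈ T, t ≠ []) (hL : cur.length ≤ L) :
    (scanA T cur 0 L = none ↔ findSuffix T cur = none) := by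
  constructor
  · intro h
    rw [scanA_eq_none] at h
    rw [findSuffix_eq_none]
    intro t ht hsuf
    have htne : t ≠ [] := hP1 t ht
    have h1 : t.length ≤ cur.length := hsuf.length_le
    have h2 : 1 ≤ t.length := List.length_pos_iff.mpr htne
    have hd : cur.drop (cur.length - t.length) = t := suffix_drop hsuf
    exact h (cur.length - t.length) (by omega) (by omega) (by rw [hd]; exact ht)
  · intro h
    rw [scanA_eq_none]
    intro j _ _ hmem
    exact findSuffix_eq_none.mp h _ hmem (List.drop_suffix j cur)

theorem scan_some {T : List (List Char)} {cur : List Char} {L i : Nat}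
    (hP1 : ∀ t ∈ T, t ≠ [])
    (hP2 : List.Pairwise (fun a b => b.length ≤ a.length) T)
    (hL : cur.length ≤ L) (h : scanA T cur 0 L = some i) :
    findSuffix T cur = some (cur.drop i) ∧ i < cur.length ∧
      cur.length - (cur.drop i).length = i := by
  obtain ⟨hm, _, hmin⟩ := scanA_eq_some L 0 i h
  have hi : i < cur.length := by
    by_contra hc
    have : cur.drop i = [] := List.drop_eq_nil_iff.mpr (by omega)
    exact hP1 [] (this ▸ hm) rfl
  obtain ⟨t, ht⟩ : ∃ t, findSuffix T cur = some t := by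
    cases h' : findSuffix T cur with
    | none => rw [(scan_none_iff hP1 hL).mpr h'] at h; cases h
    | some t => exact ⟨t, rfl⟩
  obtain ⟨hmem, hsuf, hmax⟩ := findSuffix_eq_some hP2 ht
  have h1 : cur.length - i ≤ t.length := by
    have := hmax (cur.drop i) hm (List.drop_suffix i cur)
    simpa using this
  have h2 : t.length ≤ cur.length := hsuf.length_le
  have hit : cur.drop (cur.length - t.length) = t := suffix_drop hsuf
  have h3 : ¬ (cur.length - t.length < i) := fun hc => hmin _ (by omega) hc (by rw [hit]; exact hmem)
  have h4 : cur.length - t.length = i := by omega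
  have h5 : cur.drop i = t := by rw [← h4, hit]
  refine ⟨by rw [ht, h5], hi, ?_⟩
  simp
  omega

theorem loop_eq {T : List (List Char)} {L : Nat}
    (hP1 : ∀ t ∈ T, t ≠ [])
    (hP2 : List.Pairwise (fun a b => b.length ≤ a.length) T) :
    ∀ (n : Nat) (cur : List Char), cur.length ≤ n → cur.length ≤ L → ∀ c : Int,
      solA T L cur c = loopB T cur c := by
  intro n
  induction n with
  | zero =>
    intro cur hn hL c
    have hcur : cur = [] := List.eq_nil_of_length_eq_zero (by omega)
    subst hcur
    have hs : scanA T [] 0 L = none := by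
      rw [scanA_eq_none]
      intro j _ _ hmem
      exact hP1 [] (by simpa using hmem) rfl
    rw [solA.eq_def, loopB.eq_def, hs, (scan_none_iff hP1 hL).mp hs]
  | succ n ih =>
    intro cur hn hL c
    rw [solA.eq_def, loopB.eq_def]
    cases h : scanA T cur 0 L with
    | none => rw [(scan_none_iff hP1 hL).mp h]
    | some i =>
      obtain ⟨hfs, hi, hlen⟩ := scan_some hP1 hP2 hL h
      rw [hfs]
      show (if _h : i < cur.length then solA T L (cur.take i) (c+1) else c+1) =
        (if _h : cur.length - (List.drop i cur).length < cur.length then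
          loopB T (List.take (cur.length - (List.drop i cur).length) cur) (c + 1) else c + 1)
      rw [hlen, dif_pos hi, dif_pos hi]
      apply ih
      · simp; omega
      · simp; omega

-- both ports agree whenever A's table loop has a minimal too-long power m of fitting fuel,
-- with non-decreasing lengths among the fitting entries
theorem ports_agree (binary_in : String) (x : Int) (m : Nat)
    (hmL : m ≤ binary_in.toList.length)
    (hgt : binary_in.toList.length < (binFmt (x^m)).length)
    (hmin : ∀ p < m, (binFmt (x^p)).length ≤ binary_in.toList.length)
    (hmono : ∀ p, p+1 < m → (binFmt (x^p)).length ≤ (binFmt (x^(p+1))).length) :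
    angry_beaver binary_in x = angry_beaver_alt binary_in x := by
  unfold angry_beaver angry_beaver_alt buildTable
  have hA := tableLoop_closed hgt hmin (binary_in.toList.length + 2) 0 [] [] (by omega) (by omega) (by simp)
  have hB := fitsLoop_closed hgt hmin (binary_in.toList.length + 2) 0 [] (by omega) (by omega)
  rw [hA, hB]
  simp only [Nat.zero_add, Nat.sub_zero, List.append_nil, List.nil_append]
  have hsplit : ((List.range (m+1)).map (fun j => binFmt (x^j))).reverse
      = binFmt (x^m) :: ((List.range m).map (fun j => binFmt (x^j))).reverse := by
    rw [List.range_succ]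
    simp
  rw [hsplit]
  set T : List (List Char) := ((List.range m).map (fun j => binFmt (x^j))).reverse with hTdef
  have hP1 : ∀ t ∈ T, t ≠ [] := by
    intro t ht
    rw [hTdef, List.mem_reverse, List.mem_map] at ht
    obtain ⟨j, _, rfl⟩ := ht
    exact binFmt_ne_nil _
  have hstep : ∀ i j, i < j → j < m → (binFmt (x^i)).length ≤ (binFmt (x^j)).length := by
    intro i j hij hjm
    induction j with
    | zero => omega
    | succ j ihj =>
      rcases Nat.lt_or_ge i j with h | h
      · exact le_trans (ihj h (by omega)) (hmono j (by omega))
      · have : i = j := by omega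
        subst this
        exact hmono i (by omega)
  have hP2 : List.Pairwise (fun a b => b.length ≤ a.length) T := by
    rw [hTdef, List.pairwise_reverse, List.pairwise_map]
    rw [List.pairwise_iff_getElem]
    intro i j hi hj hij
    simp only [List.getElem_range] at *
    exact hstep i j hij (by simpa using hj)
  rw [solA_cons_long hgt binary_in.toList.length binary_in.toList le_rfl le_rfl 0]
  exact loop_eq hP1 hP2 binary_in.toList.length binary_in.toList le_rfl le_rfl 0

-- ===== VERDICT (by name: the statement is the Claim_ definition above) =====
theorem angry_beaver_spec : Claim_equal_angry_beaver := by
  intro binary_in x _hDom hPre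
  unfold Spec_angry_beaver
  rcases hPre with h | hx | hx | ⟨hx, hlen⟩
  · -- empty input: m = 0
    subst h
    apply ports_agree _ _ 0 (by simp)
    · have h1 : binFmt (x^0) = ['1'] := by rw [pow_zero]; norm_num [binFmt, binFmtNat, natBinAux]
      rw [h1]; decide
    · intro p hp; omega
    · intro p hp; omega
  all_goals first
  | (-- |x| ≥ 2: m = least p with a too-long entry, exists since lengths grow past L
     have hx2 : 2 ≤ x ∨ x ≤ -2 := by omega
     have hex : ∃ p, binary_in.toList.length < (binFmt (x^p)).length :=
       ⟨binary_in.toList.length, by have := binFmt_len_lb hx2 binary_in.toList.length; omega⟩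
     apply ports_agree _ _ (Nat.find hex)
     · exact Nat.find_min' hex (by have := binFmt_len_lb hx2 binary_in.toList.length; omega)
     · exact Nat.find_spec hex
     · intro p hp
       have := Nat.find_min hex hp
       omega
     · intro p _; exact binFmt_len_mono hx2 p)
  | (-- x = -1 with a length-1 input: m = 1
     subst hx
     apply ports_agree _ _ 1 (by omega)
     · have h1 : binFmt ((-1:Int)^1) = ['-', '1'] := by rw [pow_one]; norm_num [binFmt, binFmtNat, natBinAux]
       rw [h1, hlen]; decide
     · intro p hp
       have hp0 : p = 0 := by omega
       subst hp0
       have h1 : binFmt ((-1:Int)^0) = ['1'] := by rw [pow_zero]; norm_num [binFmt, binFmtNat, natBinAux]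
       rw [h1, hlen]; decide
     · intro p hp; omega)
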